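-- pv_equiv track=rewrite | github.com/LaconicPneumonic/AdventOfCode | 6/main.py | indexOfUniqueLength
-- ===== SOURCE A (Python) =====
-- from collections import deque
--
-- def indexOfUniqueLength(line, length):
--     initial = length - 1
--     s = deque([c for c in line[:initial]])
--     for c in range(initial, len(line)):
--         s.append(line[c])
--         if len(set(s)) == length:
--             return c + 1
--         s.popleft()
-- ===== SOURCE B (Python) =====
-- def indexOfUniqueLength(line, length):
--     if length < 1 or length > len(line):
--         return None
--     counts = {}
--     distinct = 0
--     for i, ch in enumerate(line):
--         counts[ch] = counts.get(ch, 0) + 1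
--         if counts[ch] == 1:
--             distinct += 1
--         if i >= length:
--             old = line[i - length]
--             counts[old] = counts[old] - 1
--             if counts[old] == 0:
--                 distinct -= 1
--         if i >= length - 1 and distinct == length:
--             return i + 1
--     return None
-- ===== Notes on version B (the rewrite author's own statement) =====
-- stated objective: faster
-- what changed: A rebuilds a set of the whole window at every index (O(n*length)); B makes one sliding-window pass keeping a per-char count dict and a running distinct counter, updated incrementally in O(1) per char.
import Mathlib
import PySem

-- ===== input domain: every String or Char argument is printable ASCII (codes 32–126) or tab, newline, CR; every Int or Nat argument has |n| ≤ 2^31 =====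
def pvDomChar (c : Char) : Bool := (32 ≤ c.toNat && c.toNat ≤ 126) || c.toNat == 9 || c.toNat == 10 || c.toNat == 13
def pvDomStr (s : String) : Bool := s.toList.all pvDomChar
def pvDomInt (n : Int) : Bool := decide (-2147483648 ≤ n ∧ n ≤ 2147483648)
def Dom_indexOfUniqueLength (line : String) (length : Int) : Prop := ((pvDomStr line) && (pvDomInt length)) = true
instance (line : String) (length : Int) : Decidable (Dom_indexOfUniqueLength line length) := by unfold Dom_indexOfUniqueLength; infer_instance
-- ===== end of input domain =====

-- B replaces A's per-index set rebuild over the window by one sliding pass with a char-count dict and a running distinct counter.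

-- ===== PORT A =====
def pvALoop (chars : List Char) (len_ : Int) : List Int → List Char → Option Int
  | [], _ => none
  | c :: rest, s =>
    match PySem.List.pyGet? chars c with
    | none => none   -- IndexError in Python; excluded by Pre_
    | some ch =>
      let s' := s ++ [ch]
      if ((PySem.Set.ofList s').length : Int) = len_ then some (c + 1)
      else pvALoop chars len_ rest (s'.drop 1)

def indexOfUniqueLength (line : String) (length : Int) : Option Int :=
  let chars := line.toList
  let initial := length - 1
  let s := PySem.List.slice chars none (some initial)
  pvALoop chars length (PySem.List.pyRange initial (chars.length : Int)) s

-- ===== PORT B =====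
def pvBLoop (chars : List Char) (len_ : Int) : List (Int × Char) → PySem.Dict Char Int → Int → Option Int
  | [], _, _ => none
  | (i, ch) :: rest, counts, distinct =>
    let cNew := counts.getD ch 0 + 1
    let counts1 := counts.insert ch cNew
    let distinct1 := if cNew = 1 then distinct + 1 else distinct
    let st :=
      if len_ ≤ i then
        -- under B's guard 1 ≤ len_ ≤ len(chars) we have 0 ≤ i - len_ < len(chars): pyGetD is exact here
        let old := PySem.List.pyGetD chars (i - len_) ' '
        let oNew := counts1.getD old 0 - 1
        (counts1.insert old oNew, if oNew = 0 then distinct1 - 1 else distinct1)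
      else (counts1, distinct1)
    if len_ - 1 ≤ i ∧ st.2 = len_ then some (i + 1)
    else pvBLoop chars len_ rest st.1 st.2

def indexOfUniqueLength_alt (line : String) (length : Int) : Option Int :=
  let chars := line.toList
  if length < 1 ∨ (chars.length : Int) < length then none
  else pvBLoop chars length (PySem.List.enumerate chars) PySem.Dict.empty 0

-- ===== PRECONDITION & SPEC =====
-- Pre_ excludes exactly the inputs where A raises IndexError: length < 1 - len(line)
-- (the loop's first index length-1 is below -len(line), so line[c] raises).
def Pre_indexOfUniqueLength (line : String) (length : Int) : Prop :=
  1 - (line.toList.length : Int) ≤ length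
instance (line : String) (length : Int) : Decidable (Pre_indexOfUniqueLength line length) := by
  unfold Pre_indexOfUniqueLength; infer_instance

def pvWitness_indexOfUniqueLength : String × Int := ("abcade", 3)

def Spec_indexOfUniqueLength (line : String) (length : Int) (out : Option Int) : Prop := out = indexOfUniqueLength_alt line length
instance (line : String) (length : Int) (out : Option Int) : Decidable (Spec_indexOfUniqueLength line length out) := by unfold Spec_indexOfUniqueLength; infer_instance

-- ===== CLAIM (what is proved, stated in full; the proofs are below) =====
def Claim_equal_indexOfUniqueLength : Prop := ∀ (line : String) (length : Int), Dom_indexOfUniqueLength line length → Pre_indexOfUniqueLength line length → Spec_indexOfUniqueLength line length (indexOfUniqueLength line length)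


-- ===== LEMMAS AND PROOFS =====

-- len(set(xs)) is the number of distinct elements
lemma pv_setLen_eq_card (xs : List Char) : (PySem.Set.ofList xs).length = xs.toFinset.card := by
  rw [← PySem.List.dedup_eq_ofList]
  have h : (PySem.List.dedup xs).toFinset = xs.toFinset := by
    ext a; simp
  rw [← h, List.toFinset_card_of_nodup (PySem.List.nodup_dedup xs)]

lemma pv_card_append (xs : List Char) (x : Char) :
    (xs ++ [x]).toFinset.card = xs.toFinset.card + (if x ∈ xs then 0 else 1) := by
  have h : (xs ++ [x]).toFinset = insert x xs.toFinset := by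
    ext a; simp
  by_cases hx : x ∈ xs
  · simp [h, hx, Finset.insert_eq_self.mpr (List.mem_toFinset.mpr hx)]
  · rw [h, Finset.card_insert_of_notMem (by simpa using hx)]; simp [hx]

lemma pv_card_cons (x : Char) (xs : List Char) :
    (x :: xs).toFinset.card = xs.toFinset.card + (if x ∈ xs then 0 else 1) := by
  by_cases hx : x ∈ xs
  · simp [hx, Finset.insert_eq_self.mpr (List.mem_toFinset.mpr hx)]
  · rw [List.toFinset_cons, Finset.card_insert_of_notMem (by simpa using hx)]; simp [hx]

-- window of the last (up to) LN chars strictly before position c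
def pvWnd (cs : List Char) (LN c : Nat) : List Char := (cs.take c).drop (c - LN)

def pvInv (cs : List Char) (LN : Nat) (c : Nat) (counts : PySem.Dict Char Int) (distinct : Int) : Prop :=
  (∀ x : Char, counts.getD x 0 = ((pvWnd cs LN c).count x : Int)) ∧
  distinct = ((pvWnd cs LN c).toFinset.card : Int)


-- one B-iteration "add current char" update, stated on the abstract window
lemma pv_stepAdd (w : List Char) (counts : PySem.Dict Char Int) (distinct : Int) (ch : Char)
    (hc : ∀ x : Char, counts.getD x 0 = (List.count x w : Int))
    (hd : distinct = (w.toFinset.card : Int)) :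
    (∀ x : Char, (counts.insert ch (counts.getD ch 0 + 1)).getD x 0 = (List.count x (w ++ [ch]) : Int)) ∧
    ((if counts.getD ch 0 + 1 = 1 then distinct + 1 else distinct) = ((w ++ [ch]).toFinset.card : Int)) := by
  constructor
  · intro x
    rw [PySem.Dict.getD_insert]
    by_cases hx : x = ch
    · subst hx
      simp [hc x, List.count_append]
    · rw [if_neg hx, hc x]
      simp [List.count_append, Ne.symm hx]
  · rw [pv_card_append, hc ch, hd]
    by_cases hm : ch ∈ w
    · have : 0 < List.count ch w := List.count_pos_iff.mpr hm
      rw [if_neg (by omega), if_pos hm]; simp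
    · rw [List.count_eq_zero.mpr hm, if_pos (by norm_num), if_neg hm]
      push_cast; ring

-- one B-iteration "pop the leftmost window char" update
lemma pv_stepPop (old : Char) (w : List Char) (counts1 : PySem.Dict Char Int) (distinct1 : Int)
    (hc : ∀ x : Char, counts1.getD x 0 = (List.count x (old :: w) : Int))
    (hd : distinct1 = ((old :: w).toFinset.card : Int)) :
    (∀ x : Char, (counts1.insert old (counts1.getD old 0 - 1)).getD x 0 = (List.count x w : Int)) ∧
    ((if counts1.getD old 0 - 1 = 0 then distinct1 - 1 else distinct1) = (w.toFinset.card : Int)) := by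
  constructor
  · intro x
    rw [PySem.Dict.getD_insert]
    by_cases hx : x = old
    · subst hx
      rw [if_pos rfl, hc x]
      simp
    · rw [if_neg hx, hc x]
      simp [Ne.symm hx]
  · rw [hc old, hd, pv_card_cons]
    simp only [List.count_cons, BEq.rfl, if_pos]
    by_cases hm : old ∈ w
    · have : 0 < List.count old w := List.count_pos_iff.mpr hm
      rw [if_neg (by push_cast; omega), if_pos hm]; simp
    · rw [List.count_eq_zero.mpr hm, if_pos (by norm_num), if_neg hm]
      push_cast; ring

lemma pv_warm (cs : List Char) (L : Int) (hL : 1 ≤ L) (hLn : L ≤ (cs.length : Int)) :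
    ∀ (k c : Nat) (counts : PySem.Dict Char Int) (distinct : Int),
      (c : Int) + k = L - 1 → pvInv cs L.toNat c counts distinct →
      ∃ counts' distinct', pvInv cs L.toNat (L.toNat - 1) counts' distinct' ∧
        pvBLoop cs L (PySem.List.enumerate (cs.drop c) (c : Int)) counts distinct =
        pvBLoop cs L (PySem.List.enumerate (cs.drop (L.toNat - 1)) ((L.toNat : Int) - 1)) counts' distinct' := by
  intro k
  induction k with
  | zero =>
    intro c counts distinct hk hinv
    have hc : (c : Int) = (L.toNat : Int) - 1 := by omega
    have hc' : c = L.toNat - 1 := by omega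
    subst hc'
    exact ⟨counts, distinct, hinv, by rw [hc]⟩
  | succ k ih =>
    intro c counts distinct hk hinv
    have hcn : c < cs.length := by omega
    have hch : cs.drop c = cs[c] :: cs.drop (c + 1) := List.drop_eq_getElem_cons hcn
    rw [hch, PySem.List.enumerate_cons]
    rw [pvBLoop]
    have hstep := pv_stepAdd (pvWnd cs L.toNat c) counts distinct cs[c] hinv.1 hinv.2
    have hg1 : ¬ (L ≤ (c : Int)) := by omega
    have hg2 : ¬ (L - 1 ≤ (c : Int)) := by omega
    rw [if_neg hg1, if_neg (by simp [hg2])]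
    have hwnd : pvWnd cs L.toNat (c + 1) = pvWnd cs L.toNat c ++ [cs[c]] := by
      unfold pvWnd
      have h1 : c - L.toNat = 0 := by omega
      have h2 : c + 1 - L.toNat = 0 := by omega
      rw [h1, h2, List.drop_zero, List.drop_zero, List.take_add_one,
        List.getElem?_eq_getElem hcn]
      rfl
    have hinv' : pvInv cs L.toNat (c + 1)
        (counts.insert cs[c] (counts.getD cs[c] 0 + 1))
        (if counts.getD cs[c] 0 + 1 = 1 then distinct + 1 else distinct) := by
      refine ⟨?_, ?_⟩ <;> rw [hwnd]
      · exact hstep.1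
      · exact hstep.2
    have := ih (c + 1) _ _ (by push_cast; omega) hinv'
    simpa using this

lemma pv_main (cs : List Char) (L : Int) (hL : 1 ≤ L) (_hLn : L ≤ (cs.length : Int)) :
    ∀ (k c : Nat) (s : List Char) (counts : PySem.Dict Char Int) (distinct : Int),
      c + k = cs.length → L.toNat - 1 ≤ c →
      s = (cs.take c).drop (c + 1 - L.toNat) →
      pvInv cs L.toNat c counts distinct →
      pvALoop cs L (PySem.List.pyRange (c : Int) (cs.length : Int)) s =
      pvBLoop cs L (PySem.List.enumerate (cs.drop c) (c : Int)) counts distinct := by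
  intro k
  induction k with
  | zero =>
    intro c s counts distinct hk hc hs hinv
    have hc' : c = cs.length := by omega
    subst hc'
    rw [PySem.List.pyRange_one_eq_nil (by omega), List.drop_length]
    rfl
  | succ k ih =>
    intro c s counts distinct hk hcL hs hinv
    have hcn : c < cs.length := by omega
    have hLN1 : 1 ≤ L.toNat := by omega
    have hLNc : (L.toNat : Int) = L := by omega
    rw [PySem.List.pyRange_one_cons (by exact_mod_cast hcn)]
    rw [pvALoop]
    rw [PySem.List.pyGet?_natCast, List.getElem?_eq_getElem hcn]
    rw [List.drop_eq_getElem_cons hcn, PySem.List.enumerate_cons, pvBLoop]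
    set ch := cs[c] with hch
    have htake : cs.take (c + 1) = cs.take c ++ [ch] := by
      rw [List.take_add_one, List.getElem?_eq_getElem hcn]; rfl
    have hslen : (cs.take c).length = c := List.length_take_of_le (by omega)
    have hsw : s ++ [ch] = (cs.take (c + 1)).drop (c + 1 - L.toNat) := by
      rw [htake, hs, List.drop_append_of_le_length (by omega)]
    have hstep := pv_stepAdd (pvWnd cs L.toNat c) counts distinct ch hinv.1 hinv.2
    by_cases hpop : L ≤ (c : Int)
    · -- removal branch: c ≥ L, pop cs[c - L]
      have hcLn : L.toNat ≤ c := by omega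
      have hold : PySem.List.pyGetD cs ((c : Int) - L) ' ' = cs[c - L.toNat] := by
        rw [PySem.List.pyGetD_eq_getElem cs ' ' (by omega) (by omega)]
        congr 1
        omega
      rw [if_pos hpop, hold]
      dsimp only
      have hdec : pvWnd cs L.toNat c ++ [ch] = cs[c - L.toNat] :: (cs.take (c + 1)).drop (c + 1 - L.toNat) := by
        unfold pvWnd
        have h1 : c - L.toNat < (cs.take c).length := by omega
        rw [List.drop_eq_getElem_cons h1, List.getElem_take, htake,
          List.drop_append_of_le_length (by omega)]
        have h2 : c - L.toNat + 1 = c + 1 - L.toNat := by omega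
        rw [h2]
        rfl
      have hpopstep := pv_stepPop cs[c - L.toNat] ((cs.take (c + 1)).drop (c + 1 - L.toNat))
        (counts.insert ch (counts.getD ch 0 + 1))
        (if counts.getD ch 0 + 1 = 1 then distinct + 1 else distinct)
        (by rw [← hdec]; exact hstep.1) (by rw [← hdec]; exact hstep.2)
      by_cases hret : (((cs.take (c + 1)).drop (c + 1 - L.toNat)).toFinset.card : Int) = L
      · rw [if_pos (by rw [hsw, pv_setLen_eq_card]; exact hret),
          if_pos ⟨by omega, by rw [hpopstep.2]; exact hret⟩]
      · rw [if_neg (by rw [hsw, pv_setLen_eq_card]; exact hret),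
          if_neg (show ¬ (L - 1 ≤ (c : Int) ∧ _ = L) from fun h => hret (by rw [← hpopstep.2]; exact h.2))]
        have hwnd : pvWnd cs L.toNat (c + 1) = (cs.take (c + 1)).drop (c + 1 - L.toNat) := rfl
        have hinv' : pvInv cs L.toNat (c + 1)
            ((counts.insert ch (counts.getD ch 0 + 1)).insert cs[c - L.toNat]
              ((counts.insert ch (counts.getD ch 0 + 1)).getD cs[c - L.toNat] 0 - 1))
            (if (counts.insert ch (counts.getD ch 0 + 1)).getD cs[c - L.toNat] 0 - 1 = 0 then
              (if counts.getD ch 0 + 1 = 1 then distinct + 1 else distinct) - 1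
            else if counts.getD ch 0 + 1 = 1 then distinct + 1 else distinct) :=
          ⟨by rw [hwnd]; exact hpopstep.1, by rw [hwnd]; exact hpopstep.2⟩
        have hrec := ih (c + 1) ((s ++ [ch]).drop 1) _ _ (by omega) (by omega)
          (by rw [hsw, List.drop_drop]; congr 1; omega) hinv'
        push_cast at hrec ⊢
        exact hrec
    · -- no removal: here c = L - 1
      have hcEq : c = L.toNat - 1 := by omega
      rw [if_neg hpop]
      dsimp only
      have hwnd0 : pvWnd cs L.toNat c ++ [ch] = (cs.take (c + 1)).drop (c + 1 - L.toNat) := by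
        unfold pvWnd
        have h1 : c - L.toNat = 0 := by omega
        have h2 : c + 1 - L.toNat = 0 := by omega
        rw [h1, h2, List.drop_zero, List.drop_zero, htake]
      by_cases hret : (((cs.take (c + 1)).drop (c + 1 - L.toNat)).toFinset.card : Int) = L
      · rw [if_pos (by rw [hsw, pv_setLen_eq_card]; exact hret),
          if_pos ⟨by omega, by rw [hstep.2, hwnd0]; exact hret⟩]
      · rw [if_neg (by rw [hsw, pv_setLen_eq_card]; exact hret),
          if_neg (show ¬ (L - 1 ≤ (c : Int) ∧ _ = L) from
            fun h => hret (by rw [← hwnd0, ← hstep.2]; exact h.2))]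
        have hwnd : pvWnd cs L.toNat (c + 1) = pvWnd cs L.toNat c ++ [ch] := by
          rw [hwnd0]; rfl
        have hinv' : pvInv cs L.toNat (c + 1)
            (counts.insert ch (counts.getD ch 0 + 1))
            (if counts.getD ch 0 + 1 = 1 then distinct + 1 else distinct) :=
          ⟨by rw [hwnd]; exact hstep.1, by rw [hwnd]; exact hstep.2⟩
        have hrec := ih (c + 1) ((s ++ [ch]).drop 1) _ _ (by omega) (by omega)
          (by rw [hsw, List.drop_drop]; congr 1; omega) hinv'
        push_cast at hrec ⊢
        exact hrec

-- with a non-positive target length the set comparison can never fire: A runs to the end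
lemma pv_aloop_nonpos (cs : List Char) (L : Int) (hL : L ≤ 0) :
    ∀ (idxs : List Int) (s : List Char), pvALoop cs L idxs s = none := by
  intro idxs
  induction idxs with
  | nil => intro s; rfl
  | cons c rest ih =>
    intro s
    rw [pvALoop]
    cases hg : PySem.List.pyGet? cs c with
    | none => rfl
    | some ch =>
      dsimp only
      have hmem : ch ∈ PySem.Set.ofList (s ++ [ch]) :=
        (PySem.Set.mem_ofList _ _).mpr (by simp)
      have hpos : 0 < (PySem.Set.ofList (s ++ [ch])).length :=
        List.length_pos_of_mem hmem
      rw [if_neg (by omega)]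
      exact ih _

-- ===== VERDICT (by name: the statement is the Claim_ definition above) =====
theorem indexOfUniqueLength_spec : Claim_equal_indexOfUniqueLength := by
  intro line length _ hpre
  unfold Spec_indexOfUniqueLength indexOfUniqueLength indexOfUniqueLength_alt
  simp only
  set cs := line.toList with hcs
  by_cases hL1 : length < 1
  · rw [if_pos (Or.inl hL1)]
    exact pv_aloop_nonpos cs length (by omega) _ _
  · by_cases hL2 : (cs.length : Int) < length
    · rw [if_pos (Or.inr hL2)]
      rw [PySem.List.pyRange_one_eq_nil (by omega)]
      rfl
    · -- the main case: 1 ≤ length ≤ len(line)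
      have hL : 1 ≤ length := by omega
      have hLn : length ≤ (cs.length : Int) := by omega
      rw [if_neg (by push Not; exact ⟨by omega, by omega⟩)]
      have h0 : PySem.List.enumerate cs = PySem.List.enumerate (cs.drop 0) ((0 : Nat) : Int) := by
        rw [List.drop_zero]; rfl
      rw [h0]
      have hinv0 : pvInv cs length.toNat 0 PySem.Dict.empty 0 := by
        constructor
        · intro x
          rw [PySem.Dict.getD_empty]
          simp [pvWnd]
        · simp [pvWnd]
      obtain ⟨counts', distinct', hinv', hB⟩ :=
        pv_warm cs length hL hLn (length - 1).toNat 0 PySem.Dict.empty 0 (by omega) hinv0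
      rw [hB]
      have hsl : PySem.List.slice cs none (some (length - 1)) = cs.take (length.toNat - 1) := by
        rw [PySem.List.slice_to cs (by omega)]
        congr 1
        omega
      have hrg : length - 1 = ((length.toNat - 1 : Nat) : Int) := by omega
      have hst : ((length.toNat : Int) - 1) = ((length.toNat - 1 : Nat) : Int) := by omega
      rw [hsl, hrg, hst]
      exact pv_main cs length hL hLn (cs.length - (length.toNat - 1)) (length.toNat - 1)
        (cs.take (length.toNat - 1)) counts' distinct' (by omega) (by omega)
        (by rw [Nat.sub_add_cancel (by omega), Nat.sub_self, List.drop_zero]) hinv'
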